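-- pv_equiv track=rewrite | github.com/tamlog06/Atcoder-Beginner-Contest | problems/ABC/201/d/abc201_d.py | solve
-- ===== SOURCE A (Python) =====
-- def solve(H, W, A):
--     dp = [[0] * W for _ in range(H)]
--     dp[H-1][W-1] = 0
--
--     c = [[0] * W for _ in range(H)]
--     for h in range(H):
--         for w in range(W):
--             if A[h][w] == '+':
--                 c[h][w] = 1
--             else:
--                 c[h][w] = -1
--
--     for h in range(H-1, -1, -1):
--         for w in range(W-1, -1, -1):
--             if h == H-1 and w == W-1:
--                 continue
--
--             if w == W-1:
--                 dp[h][w] = c[h+1][w] - dp[h+1][w]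
--             elif h == H-1:
--                 dp[h][w] = c[h][w+1] - dp[h][w+1]
--             else:
--                 dp[h][w] = max(c[h+1][w] - dp[h+1][w], c[h][w+1] - dp[h][w+1])
--
--     if dp[0][0] > 0:
--         return 'Takahashi'
--     elif dp[0][0] == 0:
--         return 'Draw'
--     else:
--         return 'Aoki'
-- ===== SOURCE B (Python) =====
-- def solve(H, W, A):
--     # Top-down memoized evaluation of the game value from the start cell:
--     # an explicit-stack post-order DFS from (0, 0) toward the goal, computing
--     # each cell on demand (no tables, no fixed sweep order).
--     memo = {(H - 1, W - 1): 0}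
--     stack = [(0, 0)]
--     while stack:
--         h, w = stack[-1]
--         if (h, w) in memo:
--             stack.pop()
--             continue
--         kids = [(h2, w2) for h2, w2 in ((h + 1, w), (h, w + 1))
--                 if h2 < H and w2 < W]
--         todo = [k for k in kids if k not in memo]
--         if todo:
--             stack.extend(todo)
--         else:
--             stack.pop()
--             memo[(h, w)] = max((1 if A[h2][w2] == '+' else -1) - memo[(h2, w2)]
--                                for h2, w2 in kids)
--     v = memo[(0, 0)]
--     return 'Takahashi' if v > 0 else 'Draw' if v == 0 else 'Aoki'
-- ===== Notes on version B (the rewrite author's own statement) =====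
-- stated objective: alternative
-- what changed: A precomputes a full cost table and fills a dp table bottom-up in reverse row-major order with edge/interior branches; B evaluates the game value top-down from the start cell by memoized post-order DFS with an explicit stack and a dict, computing each cell's score inline on demand.
import Mathlib
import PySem

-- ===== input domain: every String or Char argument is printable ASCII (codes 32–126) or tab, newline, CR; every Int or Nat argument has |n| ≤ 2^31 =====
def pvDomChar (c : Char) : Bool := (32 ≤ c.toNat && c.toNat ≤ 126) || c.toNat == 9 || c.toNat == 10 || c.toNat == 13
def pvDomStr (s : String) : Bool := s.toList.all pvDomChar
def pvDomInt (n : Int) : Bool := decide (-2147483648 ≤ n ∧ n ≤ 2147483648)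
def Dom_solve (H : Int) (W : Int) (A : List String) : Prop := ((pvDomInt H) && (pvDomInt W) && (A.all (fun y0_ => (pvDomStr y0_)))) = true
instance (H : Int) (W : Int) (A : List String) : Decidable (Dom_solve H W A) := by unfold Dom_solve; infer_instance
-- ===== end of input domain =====

-- B replaces A's bottom-up table filling (a cost table pass, then a reverse row-major sweep)
-- by top-down memoized evaluation from the start cell: an explicit-stack post-order DFS
-- computing each cell's game value on demand ('alternative'; no speed claim).

-- ===== PORT A =====
-- dp[h][w] read / write on a list-of-lists table (total forms; indices in range under Pre_)
def tblGet (m : List (List Int)) (i j : Int) : Int :=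
  PySem.List.pyGetD (PySem.List.pyGetD m i []) j 0

def tblSet (m : List (List Int)) (i j : Int) (v : Int) : List (List Int) :=
  PySem.List.pySetD m i (PySem.List.pySetD (PySem.List.pyGetD m i []) j v)

-- body of `for w in range(W): c[h][w] = 1 if A[h][w] == '+' else -1`
def aCellBody (A : List String) (h : Int) (c : List (List Int)) (w : Int) : List (List Int) :=
  if PySem.List.pyGetD (PySem.List.pyGetD A h "").toList w ' ' = '+' then tblSet c h w 1
  else tblSet c h w (-1)

def aRowBody (A : List String) (W : Int) (c : List (List Int)) (h : Int) : List (List Int) :=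
  (PySem.List.pyRange 0 W 1).foldl (aCellBody A h) c

-- body of the inner `for w in range(W-1, -1, -1)` dp loop
def aDpCell (H W : Int) (c : List (List Int)) (h : Int) (dp : List (List Int)) (w : Int) :
    List (List Int) :=
  if h = H - 1 ∧ w = W - 1 then dp
  else if w = W - 1 then tblSet dp h w (tblGet c (h + 1) w - tblGet dp (h + 1) w)
  else if h = H - 1 then tblSet dp h w (tblGet c h (w + 1) - tblGet dp h (w + 1))
  else tblSet dp h w (max (tblGet c (h + 1) w - tblGet dp (h + 1) w)
                          (tblGet c h (w + 1) - tblGet dp h (w + 1)))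

def aDpRow (H W : Int) (c : List (List Int)) (dp : List (List Int)) (h : Int) :
    List (List Int) :=
  (PySem.List.pyRange (W - 1) (-1) (-1)).foldl (aDpCell H W c h) dp

def solve (H : Int) (W : Int) (A : List String) : String :=
  let dp : List (List Int) := (PySem.List.pyRange 0 H 1).map (fun _ => List.replicate W.toNat 0)
  let dp := tblSet dp (H - 1) (W - 1) 0
  let c : List (List Int) := (PySem.List.pyRange 0 H 1).map (fun _ => List.replicate W.toNat 0)
  let c := (PySem.List.pyRange 0 H 1).foldl (aRowBody A W) c
  let dp := (PySem.List.pyRange (H - 1) (-1) (-1)).foldl (aDpRow H W c) dp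
  if tblGet dp 0 0 > 0 then "Takahashi"
  else if tblGet dp 0 0 = 0 then "Draw"
  else "Aoki"

-- ===== PORT B =====
-- `1 if A[h2][w2] == '+' else -1` for a cell k (total form; in range under Pre_)
def bScore (A : List String) (k : Int × Int) : Int :=
  if PySem.List.pyGetD (PySem.List.pyGetD A k.1 "").toList k.2 ' ' = '+' then 1 else -1

-- `[(h2, w2) for h2, w2 in ((h+1, w), (h, w+1)) if h2 < H and w2 < W]`
def bKids (H W : Int) (h w : Int) : List (Int × Int) :=
  ([(h + 1, w), (h, w + 1)] : List (Int × Int)).filter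
    (fun k => decide (k.1 < H) && decide (k.2 < W))

-- the `while stack:` loop of Source B, with fuel making it total (the proof shows the
-- fuel passed by solve_alt is never exhausted); stack is top-first, so Python's
-- `stack.extend(todo)` is `todo.reverse ++ stack`; `max(...)` over the kids is
-- PySem.List.max? with the identity key (`.getD 0` is unreachable: kids is empty
-- only at the goal cell, which is memoized before the loop starts).
def bLoop (H W : Int) (A : List String) :
    Nat → List (Int × Int) → PySem.Dict (Int × Int) Int → PySem.Dict (Int × Int) Int
  | 0, _, memo => memo
  | _ + 1, [], memo => memo
  | fuel + 1, c :: rest, memo =>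
    if memo.contains c then bLoop H W A fuel rest memo
    else
      let kids := bKids H W c.1 c.2
      let todo := kids.filter (fun k => !memo.contains k)
      if todo.isEmpty then
        bLoop H W A fuel rest (memo.insert c
          ((PySem.List.max? (kids.map (fun k => bScore A k - memo.getD k 0)) (fun x => x)).getD 0))
      else bLoop H W A fuel (todo.reverse ++ c :: rest) memo

def solve_alt (H : Int) (W : Int) (A : List String) : String :=
  let memo := bLoop H W A (3 * (H * W).toNat + 4) [((0 : Int), (0 : Int))]
    (PySem.Dict.empty.insert (H - 1, W - 1) 0)
  let v := memo.getD (0, 0) 0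
  if v > 0 then "Takahashi" else if v = 0 then "Draw" else "Aoki"

-- ===== PRECONDITION & SPEC =====
-- Pre_ excludes exactly the inputs where Python A raises IndexError: empty grid dimensions
-- (H < 1 or W < 1), fewer than H rows, or one of the first H rows shorter than W.
def Pre_solve (H : Int) (W : Int) (A : List String) : Prop :=
  1 ≤ H ∧ 1 ≤ W ∧ H ≤ (A.length : Int) ∧ ∀ s ∈ A.take H.toNat, W ≤ (s.toList.length : Int)
instance (H : Int) (W : Int) (A : List String) : Decidable (Pre_solve H W A) := by
  unfold Pre_solve; infer_instance

def pvWitness_solve : Int × Int × List String := (2, 2, ["+-", "-+"])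

def Spec_solve (H : Int) (W : Int) (A : List String) (out : String) : Prop := out = solve_alt H W A
instance (H : Int) (W : Int) (A : List String) (out : String) : Decidable (Spec_solve H W A out) := by unfold Spec_solve; infer_instance

-- ===== CLAIM (what is proved, stated in full; the proofs are below) =====
def Claim_equal_solve : Prop := ∀ (H : Int) (W : Int) (A : List String), Dom_solve H W A → Pre_solve H W A → Spec_solve H W A (solve H W A)

-- ===== LEMMAS AND PROOFS =====

-- score of entering cell (h, w) (Nat coordinates)
def gVal (A : List String) (h w : Nat) : Int :=
  if ((A.getD h "").toList.getD w ' ') = '+' then 1 else -1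

-- the game value of cell (h, w) in an Hn × Wn grid (what both programs compute)
def gameF (A : List String) (Hn Wn : Nat) (h w : Nat) : Int :=
  if Hn ≤ h + 1 ∧ Wn ≤ w + 1 then 0
  else if Wn ≤ w + 1 then gVal A (h + 1) w - gameF A Hn Wn (h + 1) w
  else if Hn ≤ h + 1 then gVal A h (w + 1) - gameF A Hn Wn h (w + 1)
  else max (gVal A (h + 1) w - gameF A Hn Wn (h + 1) w)
           (gVal A h (w + 1) - gameF A Hn Wn h (w + 1))
termination_by (Hn - h) + (Wn - w)
decreasing_by all_goals omega


def Shaped (m : List (List Int)) (Hn Wn : Nat) : Prop :=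
  m.length = Hn ∧ ∀ r ∈ m, r.length = Wn

theorem tblGet_natCast (m : List (List Int)) (h w : Nat) :
    tblGet m (h : Int) (w : Int) = (m.getD h []).getD w 0 := by
  simp [tblGet]

theorem tblSet_natCast (m : List (List Int)) (i j : Nat) (v : Int) :
    tblSet m (i : Int) (j : Int) v = m.set i ((m.getD i []).set j v) := by
  simp [tblSet]

theorem getD_set_row (m : List (List Int)) (i : Nat) (r : List Int) (h : Nat) :
    (m.set i r).getD h [] = if h = i ∧ i < m.length then r else m.getD h [] := by
  by_cases e : h = i
  · subst e
    by_cases l : h < m.length <;> simp [List.getD, l]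
  · simp [List.getD, e, Ne.symm e]

theorem getD_set_cell (r : List Int) (j : Nat) (v : Int) (w : Nat) :
    (r.set j v).getD w 0 = if w = j ∧ j < r.length then v else r.getD w 0 := by
  by_cases e : w = j
  · subst e
    by_cases l : w < r.length <;> simp [List.getD, l]
  · simp [List.getD, e, Ne.symm e]

theorem shaped_tblSet {m : List (List Int)} {Hn Wn : Nat} (hm : Shaped m Hn Wn)
    {i : Nat} (hi : i < Hn) (j : Nat) (v : Int) :
    Shaped (tblSet m (i : Int) (j : Int) v) Hn Wn := by
  obtain ⟨hl, hr⟩ := hm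
  rw [tblSet_natCast]
  refine ⟨by simp [hl], ?_⟩
  intro r hrm
  rcases List.mem_or_eq_of_mem_set hrm with h | h
  · exact hr r h
  · subst h
    rw [List.length_set, List.getD_eq_getElem m [] (by omega)]
    exact hr _ (List.getElem_mem _)

theorem tblGet_tblSet {m : List (List Int)} {Hn Wn : Nat} (hm : Shaped m Hn Wn)
    {i j : Nat} (hi : i < Hn) (hj : j < Wn) (v : Int) (h w : Nat) :
    tblGet (tblSet m (i : Int) (j : Int) v) (h : Int) (w : Int) =
      if h = i ∧ w = j then v else tblGet m (h : Int) (w : Int) := by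
  obtain ⟨hl, hr⟩ := hm
  have hrow : (m.getD i []).length = Wn := by
    rw [List.getD_eq_getElem m [] (by omega)]
    exact hr _ (List.getElem_mem _)
  rw [tblSet_natCast, tblGet_natCast, tblGet_natCast, getD_set_row]
  by_cases e : h = i
  · subst e
    rw [if_pos ⟨rfl, by omega⟩, getD_set_cell, hrow]
    by_cases ew : w = j <;> simp [ew, hj]
  · simp [e]

theorem shaped_initTbl (H W : Int) (Hn Wn : Nat) (hH : H = (Hn : Int)) (hW : W = (Wn : Int)) :
    Shaped ((PySem.List.pyRange 0 H 1).map (fun _ => List.replicate W.toNat 0)) Hn Wn := by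
  constructor
  · simp [PySem.List.length_pyRange_one]; omega
  · intro r hr
    simp only [List.mem_map] at hr
    obtain ⟨_, _, hr⟩ := hr
    simp [← hr]; omega

theorem tblGet_initTbl (H W : Int) (h w : Nat) :
    tblGet ((PySem.List.pyRange 0 H 1).map (fun _ => List.replicate W.toNat 0)) (h : Int) (w : Int) = 0 := by
  rw [tblGet_natCast]
  rcases lt_or_ge h ((PySem.List.pyRange 0 H 1).map (fun _ => List.replicate W.toNat (0:Int))).length with hl | hl
  · rw [List.getD_eq_getElem _ [] hl]
    simp [List.getD]
  · rw [List.getD_eq_default _ [] hl]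
    simp [List.getD]

theorem aCellBody_eq (A : List String) (i w : Nat) (c : List (List Int)) :
    aCellBody A (i : Int) c (w : Int) = tblSet c (i : Int) (w : Int) (gVal A i w) := by
  unfold aCellBody gVal
  simp only [PySem.List.pyGetD_natCast]
  split <;> rfl

theorem aRowBody_eq (A : List String) (W : Int) (c : List (List Int)) (h : Int) :
    aRowBody A W c h = (PySem.List.pyRange 0 W 1).foldl (aCellBody A h) c := rfl

theorem aRow_fill (A : List String) (Hn Wn : Nat) (i : Nat) (hi : i < Hn) :
    ∀ (n : Nat) (m : List (List Int)), n ≤ Wn → Shaped m Hn Wn →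
      Shaped ((PySem.List.pyRange 0 (n : Int) 1).foldl (aCellBody A (i : Int)) m) Hn Wn ∧
      ∀ h w : Nat, tblGet ((PySem.List.pyRange 0 (n : Int) 1).foldl (aCellBody A (i : Int)) m) (h : Int) (w : Int)
        = if h = i ∧ w < n then gVal A h w else tblGet m (h : Int) (w : Int) := by
  intro n
  induction n with
  | zero =>
    intro m _ hm
    rw [PySem.List.pyRange_one_eq_nil (by omega)]
    simpa using hm
  | succ n ih =>
    intro m hn hm
    have hrw : ((n + 1 : Nat) : Int) = (n : Int) + 1 := by push_cast; ring
    rw [hrw, PySem.List.pyRange_one_succ_right (by omega), List.foldl_append]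
    obtain ⟨ihs, ihv⟩ := ih m (by omega) hm
    simp only [List.foldl_cons, List.foldl_nil]
    rw [aCellBody_eq]
    refine ⟨shaped_tblSet ihs hi n (gVal A i n), ?_⟩
    intro h w
    rw [tblGet_tblSet ihs hi (by omega) _ h w, ihv h w]
    by_cases eh : h = i
    · subst eh
      by_cases ew : w = n
      · subst ew; simp
      · have hiff : (w < n + 1) ↔ (w < n) := by omega
        simp [ew, hiff]
    · simp [eh]

theorem aC_fill (A : List String) (Hn Wn : Nat) :
    ∀ (k : Nat) (m : List (List Int)), k ≤ Hn → Shaped m Hn Wn →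
      Shaped ((PySem.List.pyRange 0 (k : Int) 1).foldl (aRowBody A (Wn : Int)) m) Hn Wn ∧
      ∀ h w : Nat, tblGet ((PySem.List.pyRange 0 (k : Int) 1).foldl (aRowBody A (Wn : Int)) m) (h : Int) (w : Int)
        = if h < k ∧ w < Wn then gVal A h w else tblGet m (h : Int) (w : Int) := by
  intro k
  induction k with
  | zero =>
    intro m _ hm
    rw [PySem.List.pyRange_one_eq_nil (by omega)]
    simpa using hm
  | succ k ih =>
    intro m hk hm
    have hrw : ((k + 1 : Nat) : Int) = (k : Int) + 1 := by push_cast; ring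
    rw [hrw, PySem.List.pyRange_one_succ_right (by omega), List.foldl_append]
    obtain ⟨ihs, ihv⟩ := ih m (by omega) hm
    simp only [List.foldl_cons, List.foldl_nil]
    rw [aRowBody_eq]
    obtain ⟨rs, rv⟩ := aRow_fill A Hn Wn k (by omega) Wn _ le_rfl ihs
    refine ⟨rs, ?_⟩
    intro h w
    rw [rv h w, ihv h w]
    by_cases hw : w < Wn
    · by_cases eh : h = k
      · subst eh; simp [hw]
      · have hiff : (h < k + 1) ↔ (h < k) := by omega
        simp [eh, hw, hiff]
    · simp [hw]

-- rows strictly below row t hold their game values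
def DoneBelow (A : List String) (Hn Wn t : Nat) (dp : List (List Int)) : Prop :=
  ∀ h w : Nat, t < h → h < Hn → w < Wn → tblGet dp (h : Int) (w : Int) = gameF A Hn Wn h w

-- cells (t, w) with s ≤ w < Wn hold their game values
def RowDone (A : List String) (Hn Wn t s : Nat) (dp : List (List Int)) : Prop :=
  ∀ w : Nat, s ≤ w → w < Wn → tblGet dp (t : Int) (w : Int) = gameF A Hn Wn t w

-- every not-yet-processed cell of rows ≤ t still holds its initial 0
def ZeroRest (t s : Nat) (dp : List (List Int)) : Prop :=
  ∀ h w : Nat, h ≤ t → (h = t → w < s) → tblGet dp (h : Int) (w : Int) = 0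

theorem aDp_row (A : List String) (Hn Wn : Nat) (hW1 : 1 ≤ Wn)
    (c : List (List Int))
    (hc : ∀ h w : Nat, h < Hn → w < Wn → tblGet c (h : Int) (w : Int) = gVal A h w)
    (t : Nat) (ht : t < Hn) :
    ∀ (s : Nat) (dp : List (List Int)), s ≤ Wn → Shaped dp Hn Wn →
      DoneBelow A Hn Wn t dp → RowDone A Hn Wn t s dp → ZeroRest t s dp →
      Shaped ((PySem.List.pyRange ((s : Int) - 1) (-1) (-1)).foldl (aDpCell (Hn : Int) (Wn : Int) c (t : Int)) dp) Hn Wn ∧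
      DoneBelow A Hn Wn t ((PySem.List.pyRange ((s : Int) - 1) (-1) (-1)).foldl (aDpCell (Hn : Int) (Wn : Int) c (t : Int)) dp) ∧
      RowDone A Hn Wn t 0 ((PySem.List.pyRange ((s : Int) - 1) (-1) (-1)).foldl (aDpCell (Hn : Int) (Wn : Int) c (t : Int)) dp) ∧
      ZeroRest t 0 ((PySem.List.pyRange ((s : Int) - 1) (-1) (-1)).foldl (aDpCell (Hn : Int) (Wn : Int) c (t : Int)) dp) := by
  intro s
  induction s with
  | zero =>
    intro dp _ hdp hbelow hrow hzero
    rw [show ((0 : Nat) : Int) - 1 = -1 by norm_num, PySem.List.pyRange_neg_one_eq_nil (by omega)]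
    simp only [List.foldl_nil]
    exact ⟨hdp, hbelow, hrow, hzero⟩
  | succ s ih =>
    intro dp hs hdp hbelow hrow hzero
    have e1 : ((s + 1 : Nat) : Int) - 1 = (s : Int) := by push_cast; ring
    rw [e1, PySem.List.pyRange_neg_one_cons (by omega), List.foldl_cons]
    -- the processed cell is (t, s)
    have hsW : s < Wn := by omega
    have hcast1 : ((t : Nat) : Int) + 1 = ((t + 1 : Nat) : Int) := by push_cast; ring
    have hcast2 : ((s : Nat) : Int) + 1 = ((s + 1 : Nat) : Int) := by push_cast; ring
    by_cases ct : t = Hn - 1 <;> by_cases cs : s = Wn - 1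
    · -- goal cell: skipped, and its initial 0 IS its game value
      have hbody : aDpCell (Hn : Int) (Wn : Int) c (t : Int) dp (s : Int) = dp := by
        unfold aDpCell
        rw [if_pos ⟨by omega, by omega⟩]
      rw [hbody]
      refine ih dp (by omega) hdp hbelow ?_ ?_
      · intro w hws hwW
        rcases Nat.eq_or_lt_of_le hws with he | hlt
        · have hg : gameF A Hn Wn t w = 0 := by
            rw [gameF, if_pos ⟨by omega, by omega⟩]
          rw [hg]
          exact hzero t w le_rfl (fun _ => by omega)
        · exact hrow w (by omega) hwW
      · intro h w hh _
        exact hzero h w hh (fun e => by omega)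
    all_goals
      first
      | -- row t = Hn - 1, s < Wn - 1: dp[t][s] = c[t][s+1] - dp[t][s+1]
        (have hval : gameF A Hn Wn t s = gVal A t (s + 1) - gameF A Hn Wn t (s + 1) := by
          rw [gameF, if_neg (by omega), if_neg (by omega), if_pos (by omega)]
         have hbody : aDpCell (Hn : Int) (Wn : Int) c (t : Int) dp (s : Int) =
            tblSet dp (t : Int) (s : Int) (gameF A Hn Wn t s) := by
          unfold aDpCell
          rw [if_neg (by omega), if_neg (by omega), if_pos (by omega), hcast2,
              hc t (s + 1) (by omega) (by omega), hrow (s + 1) le_rfl (by omega), ← hval])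
      | -- last column, t < Hn - 1: dp[t][s] = c[t+1][s] - dp[t+1][s]
        (have hval : gameF A Hn Wn t s = gVal A (t + 1) s - gameF A Hn Wn (t + 1) s := by
          rw [gameF, if_neg (by omega), if_pos (by omega)]
         have hbody : aDpCell (Hn : Int) (Wn : Int) c (t : Int) dp (s : Int) =
            tblSet dp (t : Int) (s : Int) (gameF A Hn Wn t s) := by
          unfold aDpCell
          rw [if_neg (by omega), if_pos (by omega), hcast1,
              hc (t + 1) s (by omega) (by omega), hbelow (t + 1) s (by omega) (by omega) (by omega), ← hval])
      | -- interior: max of the two moves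
        (have hval : gameF A Hn Wn t s =
            max (gVal A (t + 1) s - gameF A Hn Wn (t + 1) s)
                (gVal A t (s + 1) - gameF A Hn Wn t (s + 1)) := by
          rw [gameF, if_neg (by omega), if_neg (by omega), if_neg (by omega)]
         have hbody : aDpCell (Hn : Int) (Wn : Int) c (t : Int) dp (s : Int) =
            tblSet dp (t : Int) (s : Int) (gameF A Hn Wn t s) := by
          unfold aDpCell
          rw [if_neg (by omega), if_neg (by omega), if_neg (by omega), hcast1, hcast2,
              hc (t + 1) s (by omega) (by omega), hbelow (t + 1) s (by omega) (by omega) (by omega),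
              hc t (s + 1) (by omega) (by omega), hrow (s + 1) le_rfl (by omega), ← hval])
    all_goals
      rw [hbody]
      refine ih (tblSet dp (t : Int) (s : Int) (gameF A Hn Wn t s)) (by omega)
        (shaped_tblSet hdp ht s (gameF A Hn Wn t s)) ?_ ?_ ?_
      · intro h w hth hhH hwW
        rw [tblGet_tblSet hdp ht hsW _ h w, if_neg (by omega)]
        exact hbelow h w hth hhH hwW
      · intro w hws hwW
        rw [tblGet_tblSet hdp ht hsW _ t w]
        rcases Nat.eq_or_lt_of_le hws with he | hlt
        · rw [if_pos ⟨rfl, he.symm⟩, ← he]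
        · rw [if_neg (by omega)]
          exact hrow w (by omega) hwW
      · intro h w hh himp
        rw [tblGet_tblSet hdp ht hsW _ h w, if_neg (by omega)]
        exact hzero h w hh (fun e => by omega)

theorem aDp_all (A : List String) (Hn Wn : Nat) (hW1 : 1 ≤ Wn)
    (c : List (List Int))
    (hc : ∀ h w : Nat, h < Hn → w < Wn → tblGet c (h : Int) (w : Int) = gVal A h w) :
    ∀ (u : Nat) (dp : List (List Int)), u ≤ Hn → Shaped dp Hn Wn →
      (∀ h w : Nat, u ≤ h → h < Hn → w < Wn → tblGet dp (h : Int) (w : Int) = gameF A Hn Wn h w) →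
      (∀ h w : Nat, h < u → tblGet dp (h : Int) (w : Int) = 0) →
      ∀ h w : Nat, h < Hn → w < Wn →
        tblGet ((PySem.List.pyRange ((u : Int) - 1) (-1) (-1)).foldl (aDpRow (Hn : Int) (Wn : Int) c) dp) (h : Int) (w : Int) = gameF A Hn Wn h w := by
  intro u
  induction u with
  | zero =>
    intro dp _ _ hdone _ h w hh hw
    rw [show ((0 : Nat) : Int) - 1 = -1 by norm_num, PySem.List.pyRange_neg_one_eq_nil (by omega)]
    exact hdone h w (by omega) hh hw
  | succ u ih =>
    intro dp hu hdp hdone hzero h w hh hw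
    have e1 : ((u + 1 : Nat) : Int) - 1 = (u : Int) := by push_cast; ring
    rw [e1, PySem.List.pyRange_neg_one_cons (by omega), List.foldl_cons]
    have hrow := aDp_row A Hn Wn hW1 c hc u (by omega) Wn dp le_rfl hdp
      (fun h w hth hhH hwW => hdone h w (by omega) hhH hwW)
      (fun w hws hwW => by omega)
      (fun h w hhu himp => hzero h w (by omega))
    rw [show aDpRow (Hn : Int) (Wn : Int) c dp (u : Int) =
        (PySem.List.pyRange ((Wn : Int) - 1) (-1) (-1)).foldl (aDpCell (Hn : Int) (Wn : Int) c (u : Int)) dp from rfl]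
    obtain ⟨rs, rbelow, rrow, rzero⟩ := hrow
    refine ih _ (by omega) rs ?_ ?_ h w hh hw
    · intro h w huh hhH hwW
      rcases Nat.eq_or_lt_of_le huh with he | hlt
      · rw [← he]; exact rrow w (by omega) hwW
      · exact rbelow h w (by omega) hhH hwW
    · intro h w hhu
      exact rzero h w (by omega) (fun e => by omega)

theorem solveA_eq (H W : Int) (A : List String) (Hn Wn : Nat)
    (hH : H = (Hn : Int)) (hW : W = (Wn : Int)) (hH1 : 1 ≤ Hn) (hW1 : 1 ≤ Wn) :
    solve H W A =
      (if gameF A Hn Wn 0 0 > 0 then "Takahashi"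
       else if gameF A Hn Wn 0 0 = 0 then "Draw" else "Aoki") := by
  subst hH hW
  simp only [solve]
  have hinit := shaped_initTbl (Hn : Int) (Wn : Int) Hn Wn rfl rfl
  have ecast1 : ((Hn : Nat) : Int) - 1 = ((Hn - 1 : Nat) : Int) := by omega
  have ecast2 : ((Wn : Nat) : Int) - 1 = ((Wn - 1 : Nat) : Int) := by omega
  -- dp after the initial write is still all zeros
  have hdp0 : ∀ h w : Nat,
      tblGet (tblSet ((PySem.List.pyRange 0 (Hn : Int) 1).map (fun _ => List.replicate (Wn : Int).toNat 0)) ((Hn : Int) - 1) ((Wn : Int) - 1) 0) (h : Int) (w : Int) = 0 := by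
    intro h w
    rw [ecast1, ecast2, tblGet_tblSet hinit (by omega) (by omega) 0 h w]
    split
    · rfl
    · exact tblGet_initTbl _ _ h w
  have hdp0s : Shaped (tblSet ((PySem.List.pyRange 0 (Hn : Int) 1).map (fun _ => List.replicate (Wn : Int).toNat 0)) ((Hn : Int) - 1) ((Wn : Int) - 1) 0) Hn Wn := by
    rw [ecast1, ecast2]
    exact shaped_tblSet hinit (by omega) _ 0
  obtain ⟨hcs, hcv⟩ := aC_fill A Hn Wn Hn _ le_rfl hinit
  have hcval : ∀ h w : Nat, h < Hn → w < Wn →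
      tblGet ((PySem.List.pyRange 0 (Hn : Int) 1).foldl (aRowBody A (Wn : Int)) ((PySem.List.pyRange 0 (Hn : Int) 1).map (fun _ => List.replicate (Wn : Int).toNat 0))) (h : Int) (w : Int) = gVal A h w := by
    intro h w hh hw
    rw [hcv h w, if_pos ⟨hh, hw⟩]
  have hmain := aDp_all A Hn Wn hW1 _ hcval Hn _ le_rfl hdp0s
    (fun h w h1 h2 _ => by omega) (fun h w _ => hdp0 h w) 0 0 (by omega) (by omega)
  rw [show ((0 : Nat) : Int) = (0 : Int) by norm_num] at hmain
  rw [hmain]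

-- ===== B-side proof machinery =====

-- a stack cell is an in-grid cell with Nat coordinates
def InGridP (Hn Wn : Nat) (t : Int × Int) : Prop :=
  ∃ h w : Nat, h < Hn ∧ w < Wn ∧ t = ((h : Int), (w : Int))

-- every in-grid binding of the memo is the cell's game value
def MemoOK (A : List String) (Hn Wn : Nat) (memo : PySem.Dict (Int × Int) Int) : Prop :=
  ∀ h w : Nat, h < Hn → w < Wn → ∀ v,
    memo.get? ((h : Int), (w : Int)) = some v → v = gameF A Hn Wn h w

-- in-grid cells neither memoized nor on the stack (the loop's potential counts them)
def uSet (Hn Wn : Nat) (stack : List (Int × Int)) (memo : PySem.Dict (Int × Int) Int) :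
    Finset (Nat × Nat) :=
  (Finset.range Hn ×ˢ Finset.range Wn).filter
    (fun p => memo.get? ((p.1 : Int), (p.2 : Int)) = none ∧ ((p.1 : Int), (p.2 : Int)) ∉ stack)

theorem mem_bKids {H W : Int} {c k : Int × Int} (hk : k ∈ bKids H W c.1 c.2) :
    (k = (c.1 + 1, c.2) ∨ k = (c.1, c.2 + 1)) ∧ k.1 < H ∧ k.2 < W := by
  unfold bKids at hk
  rw [List.mem_filter] at hk
  obtain ⟨hm, hp⟩ := hk
  simp only [Bool.and_eq_true, decide_eq_true_eq] at hp
  simp only [List.mem_cons, List.not_mem_nil, or_false] at hm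
  exact ⟨hm, hp.1, hp.2⟩

theorem bKids_nodup (H W a b : Int) : (bKids H W a b).Nodup := by
  apply List.Nodup.filter
  refine List.nodup_cons.2 ⟨?_, List.nodup_singleton _⟩
  simp only [List.mem_singleton]
  intro h
  have := congrArg Prod.fst h
  simp at this

-- the value the memoize branch stores is the cell's game value
theorem bVal_eq (A : List String) (Hn Wn : Nat) (ch cw : Nat) (hch : ch < Hn) (hcw : cw < Wn)
    (memo : PySem.Dict (Int × Int) Int) (hok : MemoOK A Hn Wn memo)
    (htodo : ((bKids (Hn : Int) (Wn : Int) (ch : Int) (cw : Int)).filter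
      (fun k => !memo.contains k)) = []) :
    ((PySem.List.max? ((bKids (Hn : Int) (Wn : Int) (ch : Int) (cw : Int)).map
        (fun k => bScore A k - memo.getD k 0)) (fun x => x)).getD 0) = gameF A Hn Wn ch cw := by
  have e1 : ((ch : Int) + 1) = ((ch + 1 : Nat) : Int) := by push_cast; ring
  have e2 : ((cw : Int) + 1) = ((cw + 1 : Nat) : Int) := by push_cast; ring
  have hget : ∀ (hh ww : Nat), hh < Hn → ww < Wn →
      memo.contains ((hh : Int), (ww : Int)) = true →
      memo.getD ((hh : Int), (ww : Int)) 0 = gameF A Hn Wn hh ww := by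
    intro hh ww h1 h2 hc
    rw [PySem.Dict.contains_eq_isSome_get?] at hc
    obtain ⟨v, hv⟩ := Option.isSome_iff_exists.mp hc
    rw [PySem.Dict.getD_eq_get?_getD, hv]
    exact hok hh ww h1 h2 v hv
  have hscore : ∀ (hh ww : Nat), bScore A ((hh : Int), (ww : Int)) = gVal A hh ww := by
    intro hh ww
    unfold bScore gVal
    simp only [PySem.List.pyGetD_natCast]
  by_cases hd : ch + 1 < Hn <;> by_cases hr : cw + 1 < Wn
  · have hkids : bKids (Hn : Int) (Wn : Int) (ch : Int) (cw : Int) =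
        [((ch : Int) + 1, (cw : Int)), ((ch : Int), (cw : Int) + 1)] := by
      unfold bKids
      rw [List.filter_cons_of_pos (by simp only [Bool.and_eq_true, decide_eq_true_eq]; constructor <;> omega),
          List.filter_cons_of_pos (by simp only [Bool.and_eq_true, decide_eq_true_eq]; constructor <;> omega),
          List.filter_nil]
    rw [hkids] at htodo ⊢
    have hc1 : memo.contains ((ch : Int) + 1, (cw : Int)) = true := by
      have := List.filter_eq_nil_iff.mp htodo ((ch : Int) + 1, (cw : Int)) (by simp)
      simpa using this
    have hc2 : memo.contains ((ch : Int), (cw : Int) + 1) = true := by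
      have := List.filter_eq_nil_iff.mp htodo ((ch : Int), (cw : Int) + 1) (by simp)
      simpa using this
    have hg1 : memo.getD ((ch : Int) + 1, (cw : Int)) 0 = gameF A Hn Wn (ch + 1) cw := by
      rw [e1]
      exact hget (ch + 1) cw hd hcw (by rw [← e1]; exact hc1)
    have hg2 : memo.getD ((ch : Int), (cw : Int) + 1) 0 = gameF A Hn Wn ch (cw + 1) := by
      rw [e2]
      exact hget ch (cw + 1) hch hr (by rw [← e2]; exact hc2)
    have hs1 : bScore A ((ch : Int) + 1, (cw : Int)) = gVal A (ch + 1) cw := by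
      rw [e1]; exact hscore (ch + 1) cw
    have hs2 : bScore A ((ch : Int), (cw : Int) + 1) = gVal A ch (cw + 1) := by
      rw [e2]; exact hscore ch (cw + 1)
    simp only [List.map]
    rw [hs1, hg1, hs2, hg2, PySem.List.max?_id_cons]
    simp only [List.foldl, Option.getD_some]
    conv_rhs => rw [gameF]
    rw [if_neg (by omega), if_neg (by omega), if_neg (by omega)]
  · have hkids : bKids (Hn : Int) (Wn : Int) (ch : Int) (cw : Int) =
        [((ch : Int) + 1, (cw : Int))] := by
      unfold bKids
      rw [List.filter_cons_of_pos (by simp only [Bool.and_eq_true, decide_eq_true_eq]; constructor <;> omega),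
          List.filter_cons_of_neg (by simp only [Bool.and_eq_true, decide_eq_true_eq, not_and]; omega),
          List.filter_nil]
    rw [hkids] at htodo ⊢
    have hc1 : memo.contains ((ch : Int) + 1, (cw : Int)) = true := by
      have := List.filter_eq_nil_iff.mp htodo ((ch : Int) + 1, (cw : Int)) (by simp)
      simpa using this
    have hg1 : memo.getD ((ch : Int) + 1, (cw : Int)) 0 = gameF A Hn Wn (ch + 1) cw := by
      rw [e1]
      exact hget (ch + 1) cw hd hcw (by rw [← e1]; exact hc1)
    have hs1 : bScore A ((ch : Int) + 1, (cw : Int)) = gVal A (ch + 1) cw := by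
      rw [e1]; exact hscore (ch + 1) cw
    simp only [List.map]
    rw [hs1, hg1, PySem.List.max?_id_cons]
    simp only [List.foldl, Option.getD_some]
    conv_rhs => rw [gameF]
    rw [if_neg (by omega), if_pos (by omega)]
  · have hkids : bKids (Hn : Int) (Wn : Int) (ch : Int) (cw : Int) =
        [((ch : Int), (cw : Int) + 1)] := by
      unfold bKids
      rw [List.filter_cons_of_neg (by simp only [Bool.and_eq_true, decide_eq_true_eq, not_and]; omega),
          List.filter_cons_of_pos (by simp only [Bool.and_eq_true, decide_eq_true_eq]; constructor <;> omega),
          List.filter_nil]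
    rw [hkids] at htodo ⊢
    have hc2 : memo.contains ((ch : Int), (cw : Int) + 1) = true := by
      have := List.filter_eq_nil_iff.mp htodo ((ch : Int), (cw : Int) + 1) (by simp)
      simpa using this
    have hg2 : memo.getD ((ch : Int), (cw : Int) + 1) 0 = gameF A Hn Wn ch (cw + 1) := by
      rw [e2]
      exact hget ch (cw + 1) hch hr (by rw [← e2]; exact hc2)
    have hs2 : bScore A ((ch : Int), (cw : Int) + 1) = gVal A ch (cw + 1) := by
      rw [e2]; exact hscore ch (cw + 1)
    simp only [List.map]
    rw [hs2, hg2, PySem.List.max?_id_cons]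
    simp only [List.foldl, Option.getD_some]
    conv_rhs => rw [gameF]
    rw [if_neg (by omega), if_neg (by omega), if_pos (by omega)]
  · have hkids : bKids (Hn : Int) (Wn : Int) (ch : Int) (cw : Int) = [] := by
      unfold bKids
      rw [List.filter_cons_of_neg (by simp only [Bool.and_eq_true, decide_eq_true_eq, not_and]; omega),
          List.filter_cons_of_neg (by simp only [Bool.and_eq_true, decide_eq_true_eq, not_and]; omega),
          List.filter_nil]
    rw [hkids]
    simp only [List.map]
    rw [gameF, if_pos (by omega)]
    simp [PySem.List.max?]

theorem pairwise_le_of_const {l : List (Int × Int)} {x : Int}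
    (h : ∀ a ∈ l, a.1 + a.2 = x) :
    List.Pairwise (fun a b : Int × Int => b.1 + b.2 ≤ a.1 + a.2) l := by
  induction l with
  | nil => exact List.Pairwise.nil
  | cons a t ih =>
    refine List.Pairwise.cons ?_ (ih (fun b hb => h b (List.mem_cons_of_mem a hb)))
    intro b hb
    rw [h a (List.mem_cons_self), h b (List.mem_cons_of_mem a hb)]

theorem bLoop_main (A : List String) (Hn Wn : Nat) :
    ∀ (fuel : Nat) (stack : List (Int × Int)) (memo : PySem.Dict (Int × Int) Int),
      MemoOK A Hn Wn memo →
      (∀ t ∈ stack, InGridP Hn Wn t) →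
      stack.Nodup →
      List.Pairwise (fun a b : Int × Int => b.1 + b.2 ≤ a.1 + a.2) stack →
      stack.length + 3 * (uSet Hn Wn stack memo).card < fuel →
      MemoOK A Hn Wn (bLoop (Hn : Int) (Wn : Int) A fuel stack memo) ∧
      (∀ t ∈ stack, ((bLoop (Hn : Int) (Wn : Int) A fuel stack memo).get? t).isSome) ∧
      (∀ t v, memo.get? t = some v →
        (bLoop (Hn : Int) (Wn : Int) A fuel stack memo).get? t = some v) := by
  intro fuel
  induction fuel with
  | zero => intro stack memo _ _ _ _ hphi; omega
  | succ fuel ih =>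
    intro stack memo hok hgrid hnd hpw hphi
    cases stack with
    | nil =>
      simp only [bLoop]
      exact ⟨hok, by simp, fun t v hv => hv⟩
    | cons c rest =>
      simp only [bLoop]
      by_cases hc : memo.contains c = true
      · rw [if_pos hc]
        have hcs : memo.get? c ≠ none := by
          rw [PySem.Dict.contains_eq_isSome_get?] at hc
          exact Option.isSome_iff_ne_none.mp hc
        have hu : uSet Hn Wn rest memo = uSet Hn Wn (c :: rest) memo := by
          unfold uSet
          apply Finset.filter_congr
          intro p _
          by_cases he : ((p.1 : Int), (p.2 : Int)) = c
          · rw [he]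
            simp [hcs]
          · simp only [List.mem_cons, not_or]
            constructor
            · rintro ⟨h1, h2⟩; exact ⟨h1, he, h2⟩
            · rintro ⟨h1, _, h2⟩; exact ⟨h1, h2⟩
        obtain ⟨r1, r2, r3⟩ := ih rest memo hok
          (fun t ht => hgrid t (List.mem_cons_of_mem c ht))
          (List.Nodup.of_cons hnd) (List.Pairwise.of_cons hpw)
          (by rw [hu]; simp only [List.length_cons] at hphi; omega)
        refine ⟨r1, ?_, r3⟩
        intro t ht
        rcases List.mem_cons.mp ht with he | ht'
        · subst he
          obtain ⟨v, hv⟩ := Option.ne_none_iff_exists'.mp hcs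
          rw [r3 t v hv]
          rfl
        · exact r2 t ht'
      · rw [if_neg hc]
        have hcfalse : memo.contains c = false := by
          cases hcc : memo.contains c
          · rfl
          · exact absurd hcc hc
        have hcnone : memo.get? c = none := by
          rw [PySem.Dict.contains_eq_isSome_get?] at hcfalse
          exact Option.not_isSome_iff_eq_none.mp (by rw [hcfalse]; simp)
        obtain ⟨ch, cw, hch, hcw, hceq⟩ := hgrid c (List.mem_cons_self)
        have hsb : ∀ t ∈ c :: rest, t.1 + t.2 ≤ c.1 + c.2 := by
          intro t ht
          rcases List.mem_cons.mp ht with he | ht'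
          · rw [he]
          · exact (List.pairwise_cons.mp hpw).1 t ht'
        by_cases hte : ((bKids (Hn : Int) (Wn : Int) c.1 c.2).filter
            (fun k => !memo.contains k)).isEmpty = true
        · rw [if_pos hte]
          have htodo : (bKids (Hn : Int) (Wn : Int) c.1 c.2).filter
              (fun k => !memo.contains k) = [] := List.isEmpty_iff.mp hte
          have hval : ((PySem.List.max? ((bKids (Hn : Int) (Wn : Int) c.1 c.2).map
              (fun k => bScore A k - memo.getD k 0)) (fun x => x)).getD 0) = gameF A Hn Wn ch cw := by
            rw [hceq] at htodo ⊢
            exact bVal_eq A Hn Wn ch cw hch hcw memo hok htodo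
          have hok' : MemoOK A Hn Wn (memo.insert c
              ((PySem.List.max? ((bKids (Hn : Int) (Wn : Int) c.1 c.2).map
                (fun k => bScore A k - memo.getD k 0)) (fun x => x)).getD 0)) := by
            intro h w hh hw v hv
            rw [PySem.Dict.get?_insert] at hv
            split at hv
            · rename_i hkey
              rw [hceq, Prod.mk.injEq] at hkey
              have h1 : h = ch := by exact_mod_cast hkey.1
              have h2 : w = cw := by exact_mod_cast hkey.2
              subst h1; subst h2
              rw [← hval]
              exact (Option.some_inj.mp hv).symm
            · exact hok h w hh hw v hv
          have hu : uSet Hn Wn rest (memo.insert c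
              ((PySem.List.max? ((bKids (Hn : Int) (Wn : Int) c.1 c.2).map
                (fun k => bScore A k - memo.getD k 0)) (fun x => x)).getD 0))
              = uSet Hn Wn (c :: rest) memo := by
            unfold uSet
            apply Finset.filter_congr
            intro p _
            rw [PySem.Dict.get?_insert]
            by_cases he : ((p.1 : Int), (p.2 : Int)) = c
            · rw [if_pos he, he]
              simp
            · rw [if_neg he]
              simp only [List.mem_cons, not_or]
              constructor
              · rintro ⟨h1, h2⟩; exact ⟨h1, he, h2⟩
              · rintro ⟨h1, _, h2⟩; exact ⟨h1, h2⟩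
          obtain ⟨r1, r2, r3⟩ := ih rest _ hok'
            (fun t ht => hgrid t (List.mem_cons_of_mem c ht))
            (List.Nodup.of_cons hnd) (List.Pairwise.of_cons hpw)
            (by rw [hu]; simp only [List.length_cons] at hphi; omega)
          refine ⟨r1, ?_, ?_⟩
          · intro t ht
            rcases List.mem_cons.mp ht with he | ht'
            · subst he
              rw [r3 t _ (PySem.Dict.get?_insert_self _ _ _)]
              rfl
            · exact r2 t ht'
          · intro t v hv
            have hne : t ≠ c := by
              intro he; rw [he, hcnone] at hv; simp at hv
            exact r3 t v (by rw [PySem.Dict.get?_insert, if_neg hne]; exact hv)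
        · rw [if_neg hte]
          have htne : (bKids (Hn : Int) (Wn : Int) c.1 c.2).filter
              (fun k => !memo.contains k) ≠ [] := by
            intro he; rw [he] at hte; exact hte rfl
          have hkprop : ∀ k ∈ (bKids (Hn : Int) (Wn : Int) c.1 c.2).filter
              (fun k => !memo.contains k),
              (∃ h w : Nat, h < Hn ∧ w < Wn ∧ k = ((h : Int), (w : Int))) ∧
              k.1 + k.2 = c.1 + c.2 + 1 ∧ memo.contains k = false := by
            intro k hk
            rw [List.mem_filter] at hk
            obtain ⟨hkk, hkc⟩ := hk
            have hcf : memo.contains k = false := by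
              cases hcc : memo.contains k
              · rfl
              · rw [hcc] at hkc; simp at hkc
            obtain ⟨hform, hk1, hk2⟩ := mem_bKids hkk
            refine ⟨?_, ?_, hcf⟩
            · rcases hform with he | he
              · refine ⟨ch + 1, cw, ?_, hcw, ?_⟩
                · have : k.1 < (Hn : Int) := hk1
                  rw [he, hceq] at this
                  simp at this
                  omega
                · rw [he, hceq, Prod.ext_iff]
                  constructor <;> simp
              · refine ⟨ch, cw + 1, hch, ?_, ?_⟩
                · have : k.2 < (Wn : Int) := hk2
                  rw [he, hceq] at this
                  simp at this
                  omega
                · rw [he, hceq, Prod.ext_iff]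
                  constructor <;> simp
            · rcases hform with he | he <;> rw [he] <;> simp <;> ring
          have hknotin : ∀ k ∈ (bKids (Hn : Int) (Wn : Int) c.1 c.2).filter
              (fun k => !memo.contains k), k ∉ c :: rest := by
            intro k hk hmem
            have h1 := (hkprop k hk).2.1
            have h2 := hsb k hmem
            omega
          have htnd : ((bKids (Hn : Int) (Wn : Int) c.1 c.2).filter
              (fun k => !memo.contains k)).Nodup :=
            List.Nodup.filter _ (bKids_nodup _ _ _ _)
          -- invariants for the grown stack
          have hgrid' : ∀ t ∈ ((bKids (Hn : Int) (Wn : Int) c.1 c.2).filter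
              (fun k => !memo.contains k)).reverse ++ c :: rest, InGridP Hn Wn t := by
            intro t ht
            rcases List.mem_append.mp ht with h | h
            · exact (hkprop t (List.mem_reverse.mp h)).1
            · exact hgrid t h
          have hnd' : (((bKids (Hn : Int) (Wn : Int) c.1 c.2).filter
              (fun k => !memo.contains k)).reverse ++ c :: rest).Nodup := by
            refine List.Nodup.append (List.nodup_reverse.mpr htnd) hnd ?_
            rw [List.disjoint_left]
            intro a ha
            exact hknotin a (List.mem_reverse.mp ha)
          have hpw' : List.Pairwise (fun a b : Int × Int => b.1 + b.2 ≤ a.1 + a.2)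
              (((bKids (Hn : Int) (Wn : Int) c.1 c.2).filter
                (fun k => !memo.contains k)).reverse ++ c :: rest) := by
            rw [List.pairwise_append]
            refine ⟨?_, hpw, ?_⟩
            · apply pairwise_le_of_const (x := c.1 + c.2 + 1)
              intro a ha
              exact (hkprop a (List.mem_reverse.mp ha)).2.1
            · intro a ha b hb
              have h1 := (hkprop a (List.mem_reverse.mp ha)).2.1
              have h2 := hsb b hb
              omega
          -- potential strictly drops: the pushed cells leave the uncounted set
          have hcard : (uSet Hn Wn (((bKids (Hn : Int) (Wn : Int) c.1 c.2).filter
                (fun k => !memo.contains k)).reverse ++ c :: rest) memo).card +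
              ((bKids (Hn : Int) (Wn : Int) c.1 c.2).filter
                (fun k => !memo.contains k)).length ≤
              (uSet Hn Wn (c :: rest) memo).card := by
            classical
            set todo := (bKids (Hn : Int) (Wn : Int) c.1 c.2).filter
              (fun k => !memo.contains k) with htdef
            set T : Finset (Nat × Nat) := (todo.map (fun k => (k.1.toNat, k.2.toNat))).toFinset with hTdef
            have hdecode : ∀ k ∈ todo, ((k.1.toNat : Int), (k.2.toNat : Int)) = k := by
              intro k hk
              obtain ⟨⟨h, w, _, _, he⟩, _, _⟩ := hkprop k hk
              rw [he]
              simp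
            have hmapnd : (todo.map (fun k => (k.1.toNat, k.2.toNat))).Nodup := by
              refine List.Nodup.map_on ?_ htnd
              intro x hx y hy hxy
              have hdx := hdecode x hx
              have hdy := hdecode y hy
              rw [Prod.mk.injEq] at hxy
              rw [← hdx, ← hdy, hxy.1, hxy.2]
            have hTcard : T.card = todo.length := by
              rw [hTdef, List.toFinset_card_of_nodup hmapnd, List.length_map]
            have hTsub : T ⊆ uSet Hn Wn (c :: rest) memo := by
              intro p hp
              rw [hTdef, List.mem_toFinset, List.mem_map] at hp
              obtain ⟨k, hk, hke⟩ := hp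
              obtain ⟨⟨h, w, hh, hw, he⟩, _, hcf⟩ := hkprop k hk
              have hpk : ((p.1 : Int), (p.2 : Int)) = k := by
                rw [← hke]
                exact hdecode k hk
              unfold uSet
              rw [Finset.mem_filter]
              refine ⟨?_, ?_, ?_⟩
              · rw [Finset.mem_product, Finset.mem_range, Finset.mem_range]
                rw [he] at hpk
                rw [Prod.mk.injEq] at hpk
                have h1 : p.1 = h := by exact_mod_cast hpk.1
                have h2 : p.2 = w := by exact_mod_cast hpk.2
                constructor
                · rw [h1]; exact hh
                · rw [h2]; exact hw
              · rw [hpk]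
                rw [PySem.Dict.contains_eq_isSome_get?] at hcf
                exact Option.not_isSome_iff_eq_none.mp (by rw [hcf]; simp)
              · rw [hpk]
                exact hknotin k hk
            have hTdisj : Disjoint T (uSet Hn Wn (todo.reverse ++ c :: rest) memo) := by
              rw [Finset.disjoint_left]
              intro p hp hp2
              rw [hTdef, List.mem_toFinset, List.mem_map] at hp
              obtain ⟨k, hk, hke⟩ := hp
              have hpk : ((p.1 : Int), (p.2 : Int)) = k := by
                rw [← hke]
                exact hdecode k hk
              unfold uSet at hp2
              rw [Finset.mem_filter] at hp2
              exact hp2.2.2 (by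
                rw [hpk]
                exact List.mem_append.mpr (Or.inl (List.mem_reverse.mpr hk)))
            have hsub2 : uSet Hn Wn (todo.reverse ++ c :: rest) memo ⊆
                uSet Hn Wn (c :: rest) memo := by
              unfold uSet
              intro p hp
              rw [Finset.mem_filter] at hp ⊢
              obtain ⟨hg, h1, h2⟩ := hp
              exact ⟨hg, h1, fun hmem => h2 (List.mem_append.mpr (Or.inr hmem))⟩
            calc (uSet Hn Wn (todo.reverse ++ c :: rest) memo).card + todo.length
                = (uSet Hn Wn (todo.reverse ++ c :: rest) memo).card + T.card := by rw [hTcard]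
              _ = ((uSet Hn Wn (todo.reverse ++ c :: rest) memo) ∪ T).card := by
                  rw [Finset.card_union_of_disjoint hTdisj.symm]
              _ ≤ (uSet Hn Wn (c :: rest) memo).card := by
                  apply Finset.card_le_card
                  intro p hp
                  rcases Finset.mem_union.mp hp with h | h
                  · exact hsub2 h
                  · exact hTsub h
          have hlen1 : 1 ≤ ((bKids (Hn : Int) (Wn : Int) c.1 c.2).filter
              (fun k => !memo.contains k)).length :=
            List.length_pos_iff.mpr htne
          obtain ⟨r1, r2, r3⟩ := ih (((bKids (Hn : Int) (Wn : Int) c.1 c.2).filter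
              (fun k => !memo.contains k)).reverse ++ c :: rest) memo hok hgrid' hnd' hpw'
            (by
              rw [List.length_append, List.length_reverse]
              simp only [List.length_cons] at hphi ⊢
              omega)
          refine ⟨r1, ?_, r3⟩
          intro t ht
          exact r2 t (List.mem_append.mpr (Or.inr ht))

theorem solveB_eq (H W : Int) (A : List String) (Hn Wn : Nat)
    (hH : H = (Hn : Int)) (hW : W = (Wn : Int)) (hH1 : 1 ≤ Hn) (hW1 : 1 ≤ Wn) :
    solve_alt H W A =
      (if gameF A Hn Wn 0 0 > 0 then "Takahashi"
       else if gameF A Hn Wn 0 0 = 0 then "Draw" else "Aoki") := by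
  subst hH hW
  simp only [solve_alt]
  have hok0 : MemoOK A Hn Wn (PySem.Dict.empty.insert ((Hn : Int) - 1, (Wn : Int) - 1) 0) := by
    intro h w hh hw v hv
    rw [PySem.Dict.get?_insert] at hv
    split at hv
    · rename_i hkey
      rw [Prod.mk.injEq] at hkey
      obtain ⟨hk1, hk2⟩ := hkey
      have h1 : h = Hn - 1 := by omega
      have h2 : w = Wn - 1 := by omega
      subst h1; subst h2
      rw [gameF, if_pos (by omega)]
      exact (Option.some_inj.mp hv).symm
    · rw [PySem.Dict.get?_empty] at hv
      simp at hv
  have hgrid0 : ∀ t ∈ [((0 : Int), (0 : Int))], InGridP Hn Wn t := by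
    intro t ht
    rw [List.mem_singleton] at ht
    exact ⟨0, 0, by omega, by omega, by rw [ht]; norm_num⟩
  have hphi0 : ([((0 : Int), (0 : Int))].length : Nat) +
      3 * (uSet Hn Wn [((0 : Int), (0 : Int))]
        (PySem.Dict.empty.insert ((Hn : Int) - 1, (Wn : Int) - 1) 0)).card <
      3 * ((Hn : Int) * (Wn : Int)).toNat + 4 := by
    have hcd : (uSet Hn Wn [((0 : Int), (0 : Int))]
        (PySem.Dict.empty.insert ((Hn : Int) - 1, (Wn : Int) - 1) 0)).card ≤ Hn * Wn := by
      calc (uSet Hn Wn [((0 : Int), (0 : Int))]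
            (PySem.Dict.empty.insert ((Hn : Int) - 1, (Wn : Int) - 1) 0)).card
          ≤ (Finset.range Hn ×ˢ Finset.range Wn).card := Finset.card_filter_le _ _
        _ = Hn * Wn := by rw [Finset.card_product, Finset.card_range, Finset.card_range]
    have htn : ((Hn : Int) * (Wn : Int)).toNat = Hn * Wn := by
      rw [← Nat.cast_mul, Int.toNat_natCast]
    rw [htn]
    simp only [List.length_singleton]
    omega
  obtain ⟨r1, r2, _⟩ := bLoop_main A Hn Wn (3 * ((Hn : Int) * (Wn : Int)).toNat + 4)
    [((0 : Int), (0 : Int))] (PySem.Dict.empty.insert ((Hn : Int) - 1, (Wn : Int) - 1) 0)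
    hok0 hgrid0 (List.nodup_singleton _) (List.pairwise_singleton _ _) hphi0
  have hs := r2 ((0 : Int), (0 : Int)) (List.mem_singleton.mpr rfl)
  obtain ⟨v, hv⟩ := Option.isSome_iff_exists.mp hs
  have hvg : v = gameF A Hn Wn 0 0 := by
    refine r1 0 0 (by omega) (by omega) v ?_
    have he : ((((0 : Nat)) : Int), (((0 : Nat)) : Int)) = ((0 : Int), (0 : Int)) := by norm_num
    rw [he]
    exact hv
  rw [PySem.Dict.getD_eq_get?_getD, hv]
  simp only [Option.getD_some]
  rw [hvg]
  rfl

-- ===== VERDICT (by name: the statement is the Claim_ definition above) =====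
theorem solve_spec : Claim_equal_solve := by
  intro H W A _ hpre
  obtain ⟨h1, h2, _, _⟩ := hpre
  unfold Spec_solve
  rw [solveA_eq H W A H.toNat W.toNat (by omega) (by omega) (by omega) (by omega),
      solveB_eq H W A H.toNat W.toNat (by omega) (by omega) (by omega) (by omega)]
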